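-- pv_equiv track=rewrite | github.com/XueyangSong/EE274-Project | compressors/LZSS.py | formUniformList
-- ===== SOURCE A (Python) =====
-- import functools
-- from collections import defaultdict, Counter
--
-- def formUniformList(d):
--     l = functools.reduce(lambda l, x: l + [x[0]] * x[1], d.items(), [])
--     c, ret = Counter(l), []
--     while +c:
--         # sort ll for determinism
--         ll, times = sorted(list(+c)), min([v for _, v in (+c).items()])
--         ret.extend(ll * times)
--         for k, v in c.items():
--             c[k] = v - times if v > 0 else 0
--     return ret
-- ===== SOURCE B (Python) =====
-- def formUniformList(d):
--     cnt = {k: v for k, v in d.items() if v > 0}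
--     keys = sorted(cnt)
--     ret, prev = [], 0
--     for t in sorted(set(cnt.values())):
--         keys = [k for k in keys if cnt[k] >= t]
--         ret += keys * (t - prev)
--         prev = t
--     return ret
-- ===== Notes on version B (the rewrite author's own statement) =====
-- stated objective: faster
-- what changed: Instead of repeatedly re-sorting the surviving keys and decrementing every counter entry once per round, B sorts the keys and the distinct positive counts once and then emits, for each count threshold in ascending order, the surviving sorted keys repeated (threshold - previous threshold) times, shrinking the key list by a single filter per band.
import Mathlib
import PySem

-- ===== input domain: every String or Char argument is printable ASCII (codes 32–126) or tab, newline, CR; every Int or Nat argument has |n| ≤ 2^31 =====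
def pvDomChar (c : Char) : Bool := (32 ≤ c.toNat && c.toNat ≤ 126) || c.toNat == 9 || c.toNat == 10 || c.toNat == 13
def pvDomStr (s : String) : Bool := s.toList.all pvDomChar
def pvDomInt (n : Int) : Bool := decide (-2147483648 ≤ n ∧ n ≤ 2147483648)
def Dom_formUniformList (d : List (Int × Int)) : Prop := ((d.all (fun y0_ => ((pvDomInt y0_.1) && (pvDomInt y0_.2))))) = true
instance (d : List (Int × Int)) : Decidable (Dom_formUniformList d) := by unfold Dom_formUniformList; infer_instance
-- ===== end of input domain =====

-- B replaces A's while-loop (which re-sorts the surviving keys and rewrites every counter entry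
-- once per round) by one sort of the keys and of the distinct positive counts, emitting each
-- ascending count band once; measured faster (asymptotically fewer sorts/passes).

-- Both Pythons receive the argument as a dict: marshalling of the assoc list into that dict
-- (first-occurrence order, last value wins), shared by both ports.
def pvDictOf (d : List (Int × Int)) : PySem.Dict Int Int :=
  d.foldl (fun acc p => acc.insert p.1 p.2) PySem.Dict.empty

-- Python list repetition  xs * n  (n concatenated copies, empty for n ≤ 0) — exact.
def pvListMul (xs : List Int) (n : Int) : List Int :=
  (List.replicate n.toNat xs).flatten

-- ===== PORT A =====
-- +c : the Counter restricted to its positive entries, in c's insertion order — exact.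
def pvPlusC (c : PySem.Dict Int Int) : PySem.Dict Int Int :=
  PySem.Dict.mk (c.items.filter (fun p => decide (0 < p.2)))

-- A's while-loop; the fuel is only a totality guard (c.size + 1 always suffices, proved below).
def pvLoopA : Nat → PySem.Dict Int Int → List Int → List Int
  | 0, _, ret => ret
  | fuel+1, c, ret =>
    if (pvPlusC c).items = [] then ret
    else
      let ll := PySem.List.sorted (pvPlusC c).keys (fun k => k)
      let times := PySem.List.minD ((pvPlusC c).items.map (fun p => p.2)) (fun v => v) 0
      pvLoopA fuel
        (PySem.Dict.mk (c.items.map (fun p => (p.1, if 0 < p.2 then p.2 - times else 0))))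
        (ret ++ pvListMul ll times)

def formUniformList (d : List (Int × Int)) : List Int :=
  let l := (pvDictOf d).items.foldl (fun l x => l ++ List.replicate x.2.toNat x.1) []
  let c := PySem.Dict.counter l
  pvLoopA (c.size + 1) c []

-- ===== PORT B =====
-- one band of B: filter the surviving sorted keys by the next count threshold and emit them
-- (t - prev) times; state = (ret, keys, prev).
def pvBandStep (cnt : PySem.Dict Int Int) (s : List Int × List Int × Int) (t : Int) :
    List Int × List Int × Int :=
  let keys := s.2.1.filter (fun k => decide (t ≤ cnt.getD k 0))
  (s.1 ++ pvListMul keys (t - s.2.2), keys, t)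

def formUniformList_alt (d : List (Int × Int)) : List Int :=
  -- {k: v for k, v in d.items() if v > 0} : keys already distinct, so the dict IS the filtered items
  let cnt := PySem.Dict.mk ((pvDictOf d).items.filter (fun p => decide (0 < p.2)))
  let keys := PySem.List.sorted cnt.keys (fun k => k)
  let ts := PySem.List.sorted (PySem.Set.ofList cnt.values) (fun v => v)
  (ts.foldl (pvBandStep cnt) ([], keys, 0)).1

-- ===== PRECONDITION & SPEC =====
def Spec_formUniformList (d : List (Int × Int)) (out : List Int) : Prop := out = formUniformList_alt d
instance (d : List (Int × Int)) (out : List Int) : Decidable (Spec_formUniformList d out) := by unfold Spec_formUniformList; infer_instance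

-- ===== CLAIM (what is proved, stated in full; the proofs are below) =====
def Claim_equal_formUniformList : Prop := ∀ (d : List (Int × Int)), Dom_formUniformList d → Spec_formUniformList d (formUniformList d)

-- ===== LEMMAS AND PROOFS =====

theorem pv_ofList_replicate (k : Int) (n : Nat) (h : 0 < n) :
    PySem.Set.ofList (List.replicate n k) = [k] := by
  induction n with
  | zero => omega
  | succ n ih =>
    rw [List.replicate_succ, PySem.Set.ofList_cons]
    cases Nat.eq_zero_or_pos n with
    | inl h0 => subst h0; simp [PySem.Set.ofList_nil, PySem.Set.discard]
    | inr hp => rw [ih hp]; simp [PySem.Set.discard]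

theorem pv_mem_expand (P : List (Int × Int)) (k : Int)
    (h : k ∈ P.flatMap (fun x => List.replicate x.2.toNat x.1)) : k ∈ P.map (·.1) := by
  rw [List.mem_flatMap] at h
  obtain ⟨a, ha, hk⟩ := h
  rw [List.eq_of_mem_replicate hk]
  exact List.mem_map_of_mem ha

theorem pv_counter_items (P : List (Int × Int)) (hnd : (P.map (·.1)).Nodup) :
    (PySem.Set.ofList (P.flatMap (fun x => List.replicate x.2.toNat x.1))).map
        (fun k => (k, ((P.flatMap (fun x => List.replicate x.2.toNat x.1)).count k : Int)))
      = P.filter (fun p => decide (0 < p.2)) := by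
  induction P with
  | nil => simp
  | cons p P ih =>
    rw [List.map_cons] at hnd
    have hp1 : p.1 ∉ P.map (·.1) := (List.nodup_cons.mp hnd).1
    have hndP := (List.nodup_cons.mp hnd).2
    rw [List.flatMap_cons]
    by_cases h : 0 < p.2
    · have hn : 0 < p.2.toNat := by omega
      have hof : PySem.Set.ofList (List.replicate p.2.toNat p.1 ++
          P.flatMap (fun x => List.replicate x.2.toNat x.1)) =
          p.1 :: PySem.Set.ofList (P.flatMap (fun x => List.replicate x.2.toNat x.1)) := by
        rw [PySem.Set.ofList_append, pv_ofList_replicate _ _ hn,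
          PySem.Set.update_eq_append_filter]
        have : ∀ y ∈ PySem.Set.ofList (P.flatMap (fun x => List.replicate x.2.toNat x.1)),
            (!PySem.Set.contains [p.1] y) = true := by
          intro y hy
          have : y ∈ P.map (·.1) := pv_mem_expand P y ((PySem.Set.mem_ofList _ _).mp hy)
          have : y ≠ p.1 := fun he => hp1 (he ▸ this)
          simp [PySem.Set.contains, this]
        rw [List.filter_eq_self.mpr this]
        rfl
      rw [hof, List.map_cons]
      have hcount : ((List.replicate p.2.toNat p.1 ++
          P.flatMap (fun x => List.replicate x.2.toNat x.1)).count p.1 : Int) = p.2 := by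
        rw [List.count_append, List.count_replicate_self,
          List.count_eq_zero_of_not_mem (fun hm => hp1 (pv_mem_expand P p.1 hm))]
        omega
      have htail : (PySem.Set.ofList (P.flatMap (fun x => List.replicate x.2.toNat x.1))).map
          (fun k => (k, ((List.replicate p.2.toNat p.1 ++
            P.flatMap (fun x => List.replicate x.2.toNat x.1)).count k : Int)))
          = (PySem.Set.ofList (P.flatMap (fun x => List.replicate x.2.toNat x.1))).map
          (fun k => (k, ((P.flatMap (fun x => List.replicate x.2.toNat x.1)).count k : Int))) := by
        apply List.map_congr_left
        intro k hk
        have hkP : k ∈ P.map (·.1) := pv_mem_expand P k ((PySem.Set.mem_ofList _ _).mp hk)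
        have hk1 : k ≠ p.1 := fun he => hp1 (he ▸ hkP)
        rw [List.count_append, List.count_replicate]
        simp [Ne.symm hk1]
      rw [hcount, htail, ih hndP, List.filter_cons, if_pos (by simpa using h)]
    · have hn : p.2.toNat = 0 := by omega
      rw [hn, List.replicate_zero, List.nil_append, ih hndP, List.filter_cons]
      simp [h]

theorem pv_counter_expand (P : List (Int × Int)) (hnd : (P.map (·.1)).Nodup) :
    PySem.Dict.counter (P.flatMap (fun x => List.replicate x.2.toNat x.1))
      = PySem.Dict.mk (P.filter (fun p => decide (0 < p.2))) := by
  apply PySem.Dict.ext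
  rw [PySem.Dict.items_counter]
  exact pv_counter_items P hnd

theorem pv_pairwise_lt (l : List Int) (hle : l.Pairwise (· ≤ ·)) (hnd : l.Nodup) :
    l.Pairwise (· < ·) :=
  (hle.and hnd).imp (fun h => lt_of_le_of_ne h.1 h.2)

theorem pv_loop_eq (m : List (Int × Int)) (hnd : (m.map (·.1)).Nodup) :
    ∀ (ts : List Int), ∀ (prev : Int) (fuel : Nat) (ret : List Int),
    (PySem.List.sorted (PySem.Set.ofList (m.map (·.2))) (fun v => v)).filter
        (fun v => decide (prev < v)) = ts →
    ts.length < fuel →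
    pvLoopA fuel (PySem.Dict.mk (m.map (fun p => (p.1, if prev < p.2 then p.2 - prev else 0)))) ret
      = (ts.foldl (pvBandStep (PySem.Dict.mk m))
          (ret, (PySem.List.sorted (m.map (·.1)) (fun k => k)).filter
              (fun k => decide (prev ≤ (PySem.Dict.mk m).getD k 0)), prev)).1 := by
  have hndk : ((PySem.Dict.mk m).keys).Nodup := by
    simpa [PySem.Dict.keys_mk] using hnd
  have hgetD : ∀ p ∈ m, (PySem.Dict.mk m).getD p.1 0 = p.2 := by
    intro p hp
    exact PySem.Dict.getD_of_mem_items (PySem.Dict.mk m) (k := p.1) (v := p.2) hp hndk 0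
  have hvlt : (PySem.List.sorted (PySem.Set.ofList (m.map (·.2))) (fun v => v)).Pairwise (· < ·) :=
    PySem.List.sorted_ofList_pairwise_lt _
  have hvmem : ∀ v, v ∈ PySem.List.sorted (PySem.Set.ofList (m.map (·.2))) (fun v => v) ↔
      v ∈ m.map (·.2) := by
    intro v
    rw [PySem.List.mem_sorted]
    exact PySem.Set.mem_ofList _ _
  have hknd : (PySem.List.sorted (m.map (·.1)) (fun k => k)).Nodup :=
    ((PySem.List.sorted_perm (m.map (·.1)) (fun k => k) false).nodup_iff).mpr hnd
  have hkpl : (PySem.List.sorted (m.map (·.1)) (fun k => k)).Pairwise (· < ·) :=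
    pv_pairwise_lt _ (PySem.List.sorted_pairwise _ _) hknd
  intro ts
  induction ts with
  | nil =>
    intro prev fuel ret hts hfuel
    have hnone : ∀ p ∈ m, ¬ prev < p.2 := by
      intro p hp hlt
      have : p.2 ∈ ([] : List Int) := by
        rw [← hts]
        exact List.mem_filter.mpr ⟨(hvmem p.2).mpr (List.mem_map_of_mem hp), by simpa using hlt⟩
      simp at this
    cases fuel with
    | zero => omega
    | succ f =>
      have hguard : (pvPlusC (PySem.Dict.mk
          (m.map (fun p => (p.1, if prev < p.2 then p.2 - prev else 0))))).items = [] := by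
        show (m.map (fun p => (p.1, if prev < p.2 then p.2 - prev else 0))).filter
            (fun p => decide (0 < p.2)) = []
        rw [List.filter_eq_nil_iff]
        intro q hq
        obtain ⟨p, hp, rfl⟩ := List.mem_map.mp hq
        have := hnone p hp
        rw [if_neg this]
        simp
      simp [pvLoopA, hguard]
  | cons t ts' ih =>
    intro prev fuel ret hts hfuel
    -- facts about t and ts'
    have htf : t ∈ (PySem.List.sorted (PySem.Set.ofList (m.map (·.2))) (fun v => v)).filter
        (fun v => decide (prev < v)) := by rw [hts]; exact List.mem_cons_self ..
    have htv : t ∈ m.map (·.2) := (hvmem t).mp (List.mem_filter.mp htf).1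
    have hprevt : prev < t := by simpa using (List.mem_filter.mp htf).2
    have hfpw : (t :: ts').Pairwise (· < ·) := by
      rw [← hts]; exact List.Pairwise.sublist List.filter_sublist hvlt
    have ht_lt : ∀ v ∈ ts', t < v := (List.pairwise_cons.mp hfpw).1
    have hminv : ∀ p ∈ m, prev < p.2 → t ≤ p.2 := by
      intro p hp hlt
      have : p.2 ∈ t :: ts' := by
        rw [← hts]
        exact List.mem_filter.mpr ⟨(hvmem p.2).mpr (List.mem_map_of_mem hp), by simpa using hlt⟩
      rcases this with _ | h
      · exact le_refl _
      · exact le_of_lt (ht_lt _ (by assumption))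
    have hts' : (PySem.List.sorted (PySem.Set.ofList (m.map (·.2))) (fun v => v)).filter
        (fun v => decide (t < v)) = ts' := by
      have h1 : (PySem.List.sorted (PySem.Set.ofList (m.map (·.2))) (fun v => v)).filter
          (fun v => decide (t < v))
          = ((PySem.List.sorted (PySem.Set.ofList (m.map (·.2))) (fun v => v)).filter
              (fun v => decide (prev < v))).filter (fun v => decide (t < v)) := by
        rw [List.filter_filter]
        apply List.filter_congr
        intro v _
        by_cases hv : t < v
        · simp [hv, lt_trans hprevt hv]
        · simp [hv]
      rw [h1, hts, List.filter_cons]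
      simp only [lt_irrefl, decide_false, if_false, Bool.false_eq_true]
      exact List.filter_eq_self.mpr (fun v hv => by simpa using ht_lt v hv)
    cases fuel with
    | zero => omega
    | succ f =>
      -- the positive items of A's current counter
      have hitems : (pvPlusC (PySem.Dict.mk
          (m.map (fun p => (p.1, if prev < p.2 then p.2 - prev else 0))))).items
          = (m.filter (fun p => decide (prev < p.2))).map (fun p => (p.1, p.2 - prev)) := by
        show (m.map (fun p => (p.1, if prev < p.2 then p.2 - prev else 0))).filter
            (fun p => decide (0 < p.2)) = _
        rw [List.filter_map]
        have h1 : m.filter ((fun p : Int × Int => decide (0 < p.2)) ∘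
            (fun p => (p.1, if prev < p.2 then p.2 - prev else 0)))
            = m.filter (fun p => decide (prev < p.2)) := by
          apply List.filter_congr
          intro p _
          simp only [Function.comp_apply]
          by_cases hp : prev < p.2
          · rw [if_pos hp, decide_eq_true hp,
              decide_eq_true (show (0:Int) < p.2 - prev by omega)]
          · rw [if_neg hp]
            simp [hp]
        rw [h1]
        apply List.map_congr_left
        intro p hp
        rw [if_pos (by simpa using (List.mem_filter.mp hp).2)]
      obtain ⟨q, hq, hqt⟩ := List.mem_map.mp htv
      have hqf : q ∈ m.filter (fun p => decide (prev < p.2)) :=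
        List.mem_filter.mpr ⟨hq, by simpa using hqt ▸ hprevt⟩
      have hne : (m.filter (fun p => decide (prev < p.2))).map
          (fun p => (p.1, p.2 - prev)) ≠ [] :=
        List.ne_nil_of_mem (List.mem_map_of_mem hqf)
      -- the active key lists coincide (sorted nodup lists with the same members)
      have hK : PySem.List.sorted ((m.filter (fun p => decide (prev < p.2))).map (·.1))
            (fun k => k)
          = (PySem.List.sorted (m.map (·.1)) (fun k => k)).filter
              (fun k => decide (t ≤ (PySem.Dict.mk m).getD k 0)) := by
        apply PySem.List.sorted_eq_of_perm_of_pairwise_lt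
        · rw [List.perm_ext_iff_of_nodup
            (List.Nodup.filter _ hknd)
            (List.Nodup.sublist (List.Sublist.map (fun p : Int × Int => p.1) List.filter_sublist) hnd)]
          intro k
          constructor
          · intro hk
            have hk1 := (List.mem_filter.mp hk).1
            have hk2 : t ≤ (PySem.Dict.mk m).getD k 0 := by
              simpa using (List.mem_filter.mp hk).2
            obtain ⟨p, hp, rfl⟩ := List.mem_map.mp ((PySem.List.mem_sorted _ _ _ _).mp hk1)
            rw [hgetD p hp] at hk2
            exact List.mem_map_of_mem (List.mem_filter.mpr ⟨hp, by simp; omega⟩)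
          · intro hk
            obtain ⟨p, hp, rfl⟩ := List.mem_map.mp hk
            have hpm := (List.mem_filter.mp hp).1
            have hppos : prev < p.2 := by simpa using (List.mem_filter.mp hp).2
            refine List.mem_filter.mpr ⟨(PySem.List.mem_sorted _ _ _ _).mpr
              (List.mem_map_of_mem hpm), ?_⟩
            rw [hgetD p hpm]
            simpa using hminv p hpm hppos
        · exact List.Pairwise.sublist List.filter_sublist hkpl
      -- the emitted multiplicity is the threshold gap
      have htimes : PySem.List.minD ((m.filter (fun p => decide (prev < p.2))).map
            (fun p => p.2 - prev)) (fun v => v) 0 = t - prev := by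
        have hmemV : t - prev ∈ (m.filter (fun p => decide (prev < p.2))).map
            (fun p => p.2 - prev) := by
          refine List.mem_map.mpr ⟨q, hqf, by omega⟩
        have hVne : (m.filter (fun p => decide (prev < p.2))).map
            (fun p => p.2 - prev) ≠ [] := List.ne_nil_of_mem hmemV
        refine le_antisymm (PySem.List.minD_id_le _ _ _ hmemV) ?_
        have hmem := PySem.List.minD_mem _ (fun v => v) 0 hVne
        obtain ⟨p, hp, heq⟩ := List.mem_map.mp hmem
        have hpm := (List.mem_filter.mp hp).1
        have hppos : prev < p.2 := by simpa using (List.mem_filter.mp hp).2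
        have := hminv p hpm hppos
        omega
      -- the counter update is the shift to the new threshold
      have hupd : m.map (fun x => (x.1,
            if 0 < (if prev < x.2 then x.2 - prev else 0) then
              (if prev < x.2 then x.2 - prev else 0) - (t - prev) else 0))
          = m.map (fun p => (p.1, if t < p.2 then p.2 - t else 0)) := by
        apply List.map_congr_left
        intro p hp
        by_cases h1 : prev < p.2
        · have ht2 := hminv p hp h1
          rw [if_pos h1, if_pos (by omega : (0:Int) < p.2 - prev)]
          by_cases h3 : t < p.2
          · rw [if_pos h3]
            simp only [Prod.mk.injEq, true_and]
            omega
          · rw [if_neg h3]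
            simp only [Prod.mk.injEq, true_and]
            omega
        · rw [if_neg h1, if_neg (by omega : ¬ (0:Int) < 0),
            if_neg (by omega : ¬ t < p.2)]
      -- one unfolding of A's loop
      rw [List.foldl_cons]
      simp only [pvLoopA, PySem.Dict.keys, hitems, List.map_map]
      rw [if_neg hne]
      simp only [Function.comp_def]
      rw [htimes, hK, hupd]
      have hks : (List.filter (fun k => decide (prev ≤ (PySem.Dict.mk m).getD k 0))
            (PySem.List.sorted (m.map (·.1)) (fun k => k))).filter
            (fun k => decide (t ≤ (PySem.Dict.mk m).getD k 0))
          = (PySem.List.sorted (m.map (·.1)) (fun k => k)).filter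
              (fun k => decide (t ≤ (PySem.Dict.mk m).getD k 0)) := by
        rw [List.filter_filter]
        apply List.filter_congr
        intro k _
        by_cases hv : t ≤ (PySem.Dict.mk m).getD k 0
        · have : prev ≤ (PySem.Dict.mk m).getD k 0 := by omega
          simp [hv, this]
        · simp [hv]
      simp only [pvBandStep]
      rw [hks]
      exact ih t f _ hts' (by simp at hfuel ⊢; omega)

theorem pv_AB_eq (d : List (Int × Int)) : formUniformList d = formUniformList_alt d := by
  show pvLoopA ((PySem.Dict.counter ((pvDictOf d).items.foldl
      (fun l x => l ++ List.replicate x.2.toNat x.1) [])).size + 1)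
      (PySem.Dict.counter ((pvDictOf d).items.foldl
        (fun l x => l ++ List.replicate x.2.toNat x.1) [])) []
    = ((PySem.List.sorted (PySem.Set.ofList
          (PySem.Dict.mk ((pvDictOf d).items.filter (fun p => decide (0 < p.2)))).values)
          (fun v => v)).foldl
        (pvBandStep (PySem.Dict.mk ((pvDictOf d).items.filter (fun p => decide (0 < p.2)))))
        ([], PySem.List.sorted
            (PySem.Dict.mk ((pvDictOf d).items.filter (fun p => decide (0 < p.2)))).keys
            (fun k => k), 0)).1
  have hndP : (((pvDictOf d).items).map (·.1)).Nodup := by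
    have h := PySem.Dict.nodup_keys_foldl_insert_key d (fun p : Int × Int => p.1)
      (fun _ p => p.2) PySem.Dict.empty (by simp [PySem.Dict.keys_empty])
    simpa [PySem.Dict.keys, pvDictOf] using h
  rw [PySem.List.foldl_append_eq_flatMap, List.nil_append, pv_counter_expand _ hndP]
  set m := (pvDictOf d).items.filter (fun p => decide (0 < p.2)) with hm
  have hndm : (m.map (·.1)).Nodup :=
    List.Nodup.sublist (List.Sublist.map (fun p : Int × Int => p.1) List.filter_sublist) hndP
  have hposm : ∀ p ∈ m, 0 < p.2 := fun p hp => by simpa using (List.mem_filter.mp hp).2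
  have hgetD : ∀ p ∈ m, (PySem.Dict.mk m).getD p.1 0 = p.2 := by
    intro p hp
    exact PySem.Dict.getD_of_mem_items (PySem.Dict.mk m) (k := p.1) (v := p.2) hp
      (by simpa [PySem.Dict.keys_mk] using hndm) 0
  have hts : (PySem.List.sorted (PySem.Set.ofList (m.map (·.2))) (fun v => v)).filter
      (fun v => decide ((0:Int) < v))
      = PySem.List.sorted (PySem.Set.ofList (m.map (·.2))) (fun v => v) := by
    apply List.filter_eq_self.mpr
    intro v hv
    obtain ⟨p, hp, rfl⟩ := List.mem_map.mp
      ((PySem.Set.mem_ofList _ _).mp ((PySem.List.mem_sorted _ _ _ _).mp hv))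
    simpa using hposm p hp
  have hfuel : (PySem.List.sorted (PySem.Set.ofList (m.map (·.2))) (fun v => v)).length
      < (PySem.Dict.mk m).size + 1 := by
    have h1 : (PySem.List.sorted (PySem.Set.ofList (m.map (·.2))) (fun v => v)).length
        = (PySem.Set.ofList (m.map (·.2))).length :=
      (PySem.List.sorted_perm _ _ _).length_eq
    have h2 := PySem.Set.length_ofList_le (m.map (·.2))
    have h3 : (m.map (·.2)).length = m.length := List.length_map _
    show _ < m.length + 1
    omega
  have hmain := pv_loop_eq m hndm
    (PySem.List.sorted (PySem.Set.ofList (m.map (·.2))) (fun v => v))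
    0 ((PySem.Dict.mk m).size + 1) [] hts hfuel
  have hshift0 : m.map (fun p => (p.1, if 0 < p.2 then p.2 - 0 else 0)) = m := by
    have : ∀ p ∈ m, (p.1, if 0 < p.2 then p.2 - 0 else 0) = p := by
      intro p hp
      rw [if_pos (hposm p hp), sub_zero]
    rw [List.map_congr_left this]; exact List.map_id _
  have hks0 : (PySem.List.sorted (m.map (·.1)) (fun k => k)).filter
      (fun k => decide ((0:Int) ≤ (PySem.Dict.mk m).getD k 0))
      = PySem.List.sorted (m.map (·.1)) (fun k => k) := by
    apply List.filter_eq_self.mpr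
    intro k hk
    obtain ⟨p, hp, rfl⟩ := List.mem_map.mp ((PySem.List.mem_sorted _ _ _ _).mp hk)
    rw [hgetD p hp]
    simpa using le_of_lt (hposm p hp)
  rw [hshift0, hks0] at hmain
  simpa [PySem.Dict.keys_mk, PySem.Dict.values_mk] using hmain

-- ===== VERDICT (by name: the statement is the Claim_ definition above) =====
theorem formUniformList_spec : Claim_equal_formUniformList := by
  intro d _
  exact pv_AB_eq d
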